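-- pv_equiv track=rewrite | github.com/vincent-laluque/hello-world | exo7_16.py | changeCar
-- ===== SOURCE A (Python) =====
-- def changeCar(ch, ca1, ca2, debut = -1, fin = -1):
--     # Un si grand classique...
--
--     if (debut == -1):
--         debut = 0
--     if (fin == -1):
--         fin = len(ch)
--
--     result = ""
--     indice = 0
--
--     while (indice < len(ch)):
--         if (indice >= debut) & (indice < fin):
--             if (ch[indice] == ca1):
--                 result += ca2
--             else:
--                 result += ch[indice]
--         else:
--             result += ch[indice]
--         indice += 1
--
--     return result
-- ===== SOURCE B (Python) =====
-- def changeCar(ch, ca1, ca2, debut = -1, fin = -1):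
--     n = len(ch)
--     start = 0 if debut == -1 else max(0, debut)
--     end = n if fin == -1 else max(0, min(n, fin))
--     end = max(start, end)
--     return ch[:start] + "".join(ca2 if c == ca1 else c for c in ch[start:end]) + ch[end:]
-- ===== Notes on version B (the rewrite author's own statement) =====
-- stated objective: faster
-- what changed: Replaces A's per-index while loop with repeated string concatenation by clamped start/end bounds plus whole-slice prefix and suffix, with a single join over the [start,end) band.
import Mathlib
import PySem

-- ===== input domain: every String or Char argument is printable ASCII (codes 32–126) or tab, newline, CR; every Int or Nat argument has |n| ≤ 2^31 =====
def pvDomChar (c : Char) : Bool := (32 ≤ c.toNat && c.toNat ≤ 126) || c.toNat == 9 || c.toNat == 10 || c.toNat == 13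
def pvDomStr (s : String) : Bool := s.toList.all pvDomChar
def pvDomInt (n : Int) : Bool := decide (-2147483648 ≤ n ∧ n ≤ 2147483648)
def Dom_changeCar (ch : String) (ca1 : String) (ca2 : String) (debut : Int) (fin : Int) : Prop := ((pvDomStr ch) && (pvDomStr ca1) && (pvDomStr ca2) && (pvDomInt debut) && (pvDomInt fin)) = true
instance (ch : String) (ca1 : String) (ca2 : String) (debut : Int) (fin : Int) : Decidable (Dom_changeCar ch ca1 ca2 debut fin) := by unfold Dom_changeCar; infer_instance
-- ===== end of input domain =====

-- B replaces A's per-index while loop with repeated string concatenation by clamped slicing: untouched prefix and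
-- suffix are kept whole and one join scans the [start,end) band (objective: faster, measured).

-- ===== PORT A =====
-- while (indice < len(ch)): … ; indice += 1   — recursion over the remaining characters, carrying indice and result
def chALoop (ca1 ca2 : List Char) (debut fin : Int) : List Char → Int → List Char → List Char
  | [], _, result => result
  | c :: rest, indice, result =>
      if debut ≤ indice ∧ indice < fin then
        if [c] = ca1 then chALoop ca1 ca2 debut fin rest (indice + 1) (result ++ ca2)
        else chALoop ca1 ca2 debut fin rest (indice + 1) (result ++ [c])
      else chALoop ca1 ca2 debut fin rest (indice + 1) (result ++ [c])

def changeCar (ch : String) (ca1 : String) (ca2 : String) (debut : Int) (fin : Int) : String :=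
  let debut' := if debut = -1 then 0 else debut
  let fin' := if fin = -1 then (ch.toList.length : Int) else fin
  String.ofList (chALoop ca1.toList ca2.toList debut' fin' ch.toList 0 [])

-- ===== PORT B =====
def changeCar_alt (ch : String) (ca1 : String) (ca2 : String) (debut : Int) (fin : Int) : String :=
  let cl := ch.toList
  let n : Int := cl.length
  let start := if debut = -1 then 0 else max 0 debut
  let e := max start (if fin = -1 then n else max 0 (min n fin))
  String.ofList (PySem.List.slice cl none (some start)
    ++ (PySem.List.slice cl (some start) (some e)).flatMap
         (fun c => if [c] = ca1.toList then ca2.toList else [c])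
    ++ PySem.List.slice cl (some e) none)

-- ===== PRECONDITION & SPEC =====
def Spec_changeCar (ch : String) (ca1 : String) (ca2 : String) (debut : Int) (fin : Int) (out : String) : Prop := out = changeCar_alt ch ca1 ca2 debut fin
instance (ch : String) (ca1 : String) (ca2 : String) (debut : Int) (fin : Int) (out : String) : Decidable (Spec_changeCar ch ca1 ca2 debut fin out) := by unfold Spec_changeCar; infer_instance

-- ===== CLAIM (what is proved, stated in full; the proofs are below) =====
def Claim_equal_changeCar : Prop := ∀ (ch : String) (ca1 : String) (ca2 : String) (debut : Int) (fin : Int), Dom_changeCar ch ca1 ca2 debut fin → Spec_changeCar ch ca1 ca2 debut fin (changeCar ch ca1 ca2 debut fin)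

-- ===== LEMMAS AND PROOFS =====

-- shared spec: replace within the band [s, e) (s ≤ e), counting down as we walk the list
def sfn (repl : Char → List Char) : Nat → Nat → List Char → List Char
  | _, _, [] => []
  | 0, 0, c :: r => c :: sfn repl 0 0 r
  | 0, e + 1, c :: r => repl c ++ sfn repl 0 e r
  | s + 1, e, c :: r => c :: sfn repl s (e - 1) r

theorem chALoop_eq_sfn (ca1 ca2 : List Char) (d f : Int) :
    ∀ (cl : List Char) (i : Int) (s e : Nat) (acc : List Char),
      (∀ j : Nat, j < cl.length → ((d ≤ i + j ∧ i + j < f) ↔ (s ≤ j ∧ j < e))) →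
      chALoop ca1 ca2 d f cl i acc
        = acc ++ sfn (fun c => if [c] = ca1 then ca2 else [c]) s e cl := by
  intro cl
  induction cl with
  | nil => intro i s e acc h; simp [chALoop, sfn]
  | cons c r ih =>
    intro i s e acc h
    have h0 := h 0 (by simp)
    simp only [Int.natCast_zero, add_zero] at h0
    match s, e with
    | 0, 0 =>
      have hc : ¬ (d ≤ i ∧ i < f) := by omega
      rw [chALoop, if_neg hc, ih (i + 1) 0 0 (acc ++ [c])
        (by intro j hj
            have := h (j + 1) (by simpa using Nat.succ_lt_succ hj)
            push_cast at this ⊢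
            omega)]
      simp [sfn]
    | 0, e' + 1 =>
      have hc : d ≤ i ∧ i < f := by omega
      rw [chALoop, if_pos hc]
      have harg : ∀ j : Nat, j < r.length → ((d ≤ (i+1) + j ∧ (i+1) + j < f) ↔ (0 ≤ j ∧ j < e')) := by
        intro j hj
        have := h (j + 1) (by simpa using Nat.succ_lt_succ hj)
        constructor
        · intro hh
          have h2 := this.mp (by push_cast; omega)
          omega
        · intro hh
          have h2 : ¬ (0 ≤ j + 1 ∧ j + 1 < e' + 1) → False := fun hq => hq ⟨by omega, by omega⟩
          have h3 := this.mpr (by omega)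
          push_cast at h3
          omega
      by_cases hca : [c] = ca1
      · rw [if_pos hca, ih (i + 1) 0 e' (acc ++ ca2) harg]
        simp [sfn, hca]
      · rw [if_neg hca, ih (i + 1) 0 e' (acc ++ [c]) harg]
        simp [sfn, hca]
    | s' + 1, e =>
      have hc : ¬ (d ≤ i ∧ i < f) := by omega
      rw [chALoop, if_neg hc, ih (i + 1) s' (e - 1) (acc ++ [c])
        (by intro j hj
            have := h (j + 1) (by simpa using Nat.succ_lt_succ hj)
            push_cast at this ⊢
            omega)]
      simp [sfn]

theorem slices_eq_sfn (repl : Char → List Char) :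
    ∀ (cl : List Char) (s e : Nat), s ≤ e →
      cl.take s ++ ((cl.drop s).take (e - s)).flatMap repl ++ cl.drop e
        = sfn repl s e cl := by
  intro cl
  induction cl with
  | nil => intro s e _; simp [sfn]
  | cons c r ih =>
    intro s e hse
    match s, e with
    | 0, 0 =>
      simp only [sfn, List.take_zero, Nat.sub_zero, List.drop_zero, List.flatMap_nil,
        List.nil_append]
      rw [← ih 0 0 le_rfl]
      simp
    | 0, e' + 1 =>
      simp only [List.take_zero, List.drop_zero, List.take_succ_cons, List.drop_succ_cons,
        List.flatMap_cons, List.nil_append, sfn, Nat.sub_zero]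
      rw [← ih 0 e' (Nat.zero_le _)]
      simp
    | s' + 1, 0 => exact absurd hse (by omega)
    | s' + 1, e' + 1 =>
      simp only [List.take_succ_cons, List.drop_succ_cons, sfn, List.cons_append,
        Nat.succ_sub_succ, Nat.sub_zero]
      rw [ih s' e' (by omega)]

-- ===== VERDICT (by name: the statement is the Claim_ definition above) =====
theorem changeCar_spec : Claim_equal_changeCar := by
  intro ch ca1 ca2 debut fin _
  unfold Spec_changeCar changeCar changeCar_alt
  dsimp only
  set cl := ch.toList with hcl
  set n : Int := (cl.length : Int) with hn
  set start : Int := if debut = -1 then 0 else max 0 debut with hstart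
  set e : Int := max start (if fin = -1 then n else max 0 (min n fin)) with he
  have hstart0 : 0 ≤ start := by rw [hstart]; split_ifs <;> simp
  have he0 : 0 ≤ e := le_trans hstart0 (le_max_left _ _)
  have hse : start ≤ e := le_max_left _ _
  rw [PySem.List.slice_to cl hstart0, PySem.List.slice_from cl he0,
      PySem.List.slice_toNat cl hstart0 he0]
  rw [slices_eq_sfn _ cl start.toNat e.toNat (by omega)]
  congr 1
  apply chALoop_eq_sfn
  intro j hj
  have hjn : (j : Int) < n := by rw [hn]; exact_mod_cast hj
  have hj0 : (0:Int) ≤ (j:Int) := Int.natCast_nonneg j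
  constructor
  · intro ⟨h1, h2⟩
    simp only [zero_add] at h1 h2
    constructor
    · rw [hstart] at hstart0 ⊢; split_ifs at h1 ⊢ with hd <;> omega
    · have hej : (j : Int) < e := by
        rw [he]
        rw [hstart] at *
        split_ifs at h1 h2 ⊢ with hd hf hf <;> simp_all
      omega
  · intro ⟨h1, h2⟩
    have h1' : start ≤ (j:Int) := by omega
    have h2' : (j:Int) < e := by omega
    simp only [zero_add]
    rw [hstart] at h1'
    rw [he, hstart] at h2'
    constructor
    · split_ifs at h1' with hd <;> omega
    · split_ifs at h2' with hd hf hf <;> simp_all <;> omega
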